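-- pv_equiv track=rewrite | github.com/adir-chen/FactCheckingAggregation | claims/views.py | check_if_input_format_is_valid
-- ===== SOURCE A (Python) =====
-- def check_if_input_format_is_valid(user_input):
--     import string
--     if user_input == '':
--         return True
--     if not all(user_inp.isdigit() or
--                user_inp.isalpha() or
--                user_inp.isspace() or
--                user_inp == ',' or
--                user_inp not in string.punctuation for user_inp in user_input):
--         return False
--     first_tag = True
--     for user_inp in user_input.split(','):
--         if not user_inp or user_inp.isspace():
--             return False
--         elif first_tag and user_inp[0].isspace():
--             return False
--         first_tag = False
--         num_spaces = 0
--         for char in user_inp: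
--             if char.isspace():
--                 num_spaces += 1
--                 if num_spaces == 2:
--                     return False
--             else:
--                 num_spaces = 0
--     return True
-- ===== SOURCE B (Python) =====
-- def check_if_input_format_is_valid(user_input):
--     import string
--     if user_input == '':
--         return True
--     forbidden = set(string.punctuation) - {','}
--     first_seg = True       # still inside the first comma-separated segment
--     seen_nonspace = False  # current segment contains a non-whitespace character
--     at_seg_start = True    # nothing of the current segment consumed yet
--     prev_space = False     # previous character of the segment was whitespace
--     for ch in user_input:
--         if ch in forbidden:
--             return False
--         if ch == ',':
--             if not seen_nonspace:
--                 return False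
--             first_seg = False
--             seen_nonspace = False
--             at_seg_start = True
--             prev_space = False
--         elif ch.isspace():
--             if prev_space or (at_seg_start and first_seg):
--                 return False
--             prev_space = True
--             at_seg_start = False
--         else:
--             seen_nonspace = True
--             prev_space = False
--             at_seg_start = False
--     return seen_nonspace
-- ===== Notes on version B (the rewrite author's own statement) =====
-- stated objective: alternative
-- what changed: A makes a whole-string punctuation pre-scan, then splits on commas and runs a per-segment loop with a whitespace counter; B is a single-pass state machine over the characters that tracks (first segment, seen non-space, at segment start, previous char was space) and never materializes the split.
import Mathlib
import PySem

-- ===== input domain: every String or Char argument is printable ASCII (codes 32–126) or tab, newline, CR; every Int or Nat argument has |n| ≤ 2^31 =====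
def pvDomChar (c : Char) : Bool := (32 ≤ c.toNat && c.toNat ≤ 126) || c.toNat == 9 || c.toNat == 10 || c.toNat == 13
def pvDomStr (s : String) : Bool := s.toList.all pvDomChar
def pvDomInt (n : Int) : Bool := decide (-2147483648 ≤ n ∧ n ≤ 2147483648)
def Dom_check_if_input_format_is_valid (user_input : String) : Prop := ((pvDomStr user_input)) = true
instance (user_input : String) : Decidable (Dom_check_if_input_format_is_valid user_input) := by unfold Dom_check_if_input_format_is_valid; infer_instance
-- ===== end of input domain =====

-- B replaces A's two passes (punctuation pre-scan, then split(',') with a per-segment loop)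
-- by a single state-machine pass over the characters; objective: alternative (single pass).

-- ===== PORT A =====

-- string.punctuation
def pyPunctuation : List Char :=
  ['!', '"', '#', '$', '%', '&', '\'', '(', ')', '*', '+', ',', '-', '.', '/',
   ':', ';', '<', '=', '>', '?', '@', '[', '\\', ']', '^', '_', '`', '{', '|', '}', '~']

-- the per-character condition of A's `all(...)`
def pyAAllowed (c : Char) : Bool :=
  PySem.Chars.isdigit c || PySem.Chars.isalpha c || PySem.Chars.isspace c ||
    c == ',' || !(pyPunctuation.contains c)

-- A's inner `for char in user_inp` loop with the num_spaces counter (false = `return False`)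
def pyASegScan : List Char → Nat → Bool
  | [], _ => true
  | c :: rest, num_spaces =>
    if PySem.Chars.isspace c then
      if num_spaces + 1 == 2 then false else pyASegScan rest (num_spaces + 1)
    else pyASegScan rest 0

-- A's outer `for user_inp in user_input.split(',')` loop (false = `return False`)
def pyAOuter : List (List Char) → Bool → Bool
  | [], _ => true
  | seg :: rest, first_tag =>
    if seg.isEmpty || PySem.Chars.strIsspace seg then false
    else if first_tag && PySem.Chars.isspace (seg.headD ' ') then false
    else if pyASegScan seg 0 then pyAOuter rest false
    else false

def check_if_input_format_is_valid (user_input : String) : Bool :=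
  if user_input == "" then true
  else if !(user_input.toList.all pyAAllowed) then false
  else pyAOuter (PySem.Chars.splitOn user_input.toList [',']) true

-- ===== PORT B =====

-- set(string.punctuation) - {','}
def pyForbidden : PySem.Set Char :=
  PySem.Set.diff (PySem.Set.ofList pyPunctuation) (PySem.Set.ofList [','])

-- B's single pass; state = (first_seg, seen_nonspace, at_seg_start, prev_space)
def pyBLoop : List Char → Bool → Bool → Bool → Bool → Bool
  | [], _, seen_nonspace, _, _ => seen_nonspace
  | ch :: rest, first_seg, seen_nonspace, at_seg_start, prev_space =>
    if PySem.Set.contains pyForbidden ch then false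
    else if ch == ',' then
      if !seen_nonspace then false
      else pyBLoop rest false false true false
    else if PySem.Chars.isspace ch then
      if prev_space || (at_seg_start && first_seg) then false
      else pyBLoop rest first_seg seen_nonspace false true
    else pyBLoop rest first_seg true false false

def check_if_input_format_is_valid_alt (user_input : String) : Bool :=
  if user_input == "" then true
  else pyBLoop user_input.toList true false true false

-- ===== PRECONDITION & SPEC =====
def Spec_check_if_input_format_is_valid (user_input : String) (out : Bool) : Prop := out = check_if_input_format_is_valid_alt user_input
instance (user_input : String) (out : Bool) : Decidable (Spec_check_if_input_format_is_valid user_input out) := by unfold Spec_check_if_input_format_is_valid; infer_instance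

-- ===== CLAIM (what is proved, stated in full; the proofs are below) =====
def Claim_equal_check_if_input_format_is_valid : Prop := ∀ (user_input : String), Dom_check_if_input_format_is_valid user_input → Spec_check_if_input_format_is_valid user_input (check_if_input_format_is_valid user_input)

-- ===== LEMMAS AND PROOFS =====

-- reference split on ',' (what .split(',') computes), with clean cons equations
def notComma (c : Char) : Bool := c != ','

def mySplit (l : List Char) : List (List Char) :=
  if hr : l.dropWhile notComma = [] then [l.takeWhile notComma]
  else l.takeWhile notComma :: mySplit (l.dropWhile notComma).tail
termination_by l.length
decreasing_by
  have h1 : (l.dropWhile notComma).length ≤ l.length := List.length_dropWhile_le _ l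
  have h2 : (l.dropWhile notComma).length ≠ 0 := by
    intro hh; exact hr (List.length_eq_zero_iff.mp hh)
  simp only [List.length_tail]
  omega

def prependFirst (c : Char) : List (List Char) → List (List Char)
  | [] => [[c]]
  | s :: ss => (c :: s) :: ss

theorem mySplit_nil : mySplit [] = [[]] := by simp [mySplit]

theorem mySplit_comma (r : List Char) : mySplit (',' :: r) = [] :: mySplit r := by
  have hd : (',' :: r).dropWhile notComma = ',' :: r := by simp [List.dropWhile, notComma]
  have ht : (',' :: r).takeWhile notComma = [] := by simp [List.takeWhile, notComma]
  conv_lhs => rw [mySplit]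
  simp [hd, ht]

theorem mySplit_cons (c : Char) (r : List Char) (h : c ≠ ',') :
    mySplit (c :: r) = prependFirst c (mySplit r) := by
  have hcne : (c != ',') = true := bne_iff_ne.mpr h
  have hd : (c :: r).dropWhile notComma = r.dropWhile notComma := by
    simp [List.dropWhile, notComma, hcne]
  have ht : (c :: r).takeWhile notComma = c :: r.takeWhile notComma := by
    simp [List.takeWhile, notComma, hcne]
  conv_lhs => rw [mySplit]
  conv_rhs => rw [mySplit]
  rcases he : List.dropWhile notComma r with _ | ⟨d, ds⟩ <;>
    simp [hd, ht, he, prependFirst]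

theorem mySplit_ne_nil (l : List Char) : mySplit l ≠ [] := by
  rw [mySplit]
  split <;> simp

-- characterization of PySem's splitOn on the single-char separator [',']
theorem splitOn_go_spec (fuel : Nat) (l cur : List Char) (acc : List (List Char))
    (h : l.length < fuel) :
    PySem.Chars.splitOn.go [','] fuel l cur acc =
      acc.reverse ++ ((cur.reverse ++ (mySplit l).headD []) :: (mySplit l).tail) := by
  induction fuel generalizing l cur acc with
  | zero => omega
  | succ f ih =>
    cases l with
    | nil => simp [PySem.Chars.splitOn.go, mySplit_nil]
    | cons c rest =>
      by_cases hc : c = ','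
      · subst hc
        have hpre : List.isPrefixOf [','] (',' :: rest) = true := by
          simp [List.isPrefixOf]
        rw [PySem.Chars.splitOn.go]
        simp only [hpre, if_pos, List.length_cons, List.length_nil, List.drop_succ_cons, List.drop_zero]
        rw [ih rest [] (List.reverse cur :: acc) (by simpa using Nat.lt_of_succ_lt_succ h)]
        rcases hm : mySplit rest with _ | ⟨s, ss⟩
        · exact absurd hm (mySplit_ne_nil rest)
        · simp [mySplit_comma, hm]
      · have hpre : List.isPrefixOf [','] (c :: rest) = false := by
          simp [List.isPrefixOf, List.isPrefixOf_iff_prefix]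
          intro hh; exact absurd hh.symm hc
        rw [PySem.Chars.splitOn.go]
        simp only [hpre, Bool.false_eq_true, if_false]
        rw [ih rest (c :: cur) acc (by simpa using Nat.lt_of_succ_lt_succ h)]
        rw [mySplit_cons c rest hc]
        rcases hm : mySplit rest with _ | ⟨s, ss⟩
        · exact absurd hm (mySplit_ne_nil rest)
        · simp [prependFirst]

theorem splitOn_eq_mySplit (l : List Char) :
    PySem.Chars.splitOn l [','] = mySplit l := by
  rw [PySem.Chars.splitOn, splitOn_go_spec (l.length + 1) l [] [] (by omega)]
  rcases hm : mySplit l with _ | ⟨s, ss⟩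
  · exact absurd hm (mySplit_ne_nil l)
  · simp

-- the concrete value of the forbidden set (punctuation minus the comma)
set_option maxRecDepth 2000 in
theorem pyForbidden_eq : pyForbidden =
    ['!', '"', '#', '$', '%', '&', '\'', '(', ')', '*', '+', '-', '.', '/',
     ':', ';', '<', '=', '>', '?', '@', '[', '\\', ']', '^', '_', '`', '{', '|', '}', '~'] := by
  decide

-- A's character test agrees with B's forbidden-set test, for every character
set_option maxRecDepth 10000 in
theorem allowed_iff (c : Char) : pyAAllowed c = !(PySem.Set.contains pyForbidden c) := by
  rw [pyForbidden_eq]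
  by_cases h : c ∈ pyPunctuation
  · have hall : pyPunctuation.all (fun c => pyAAllowed c ==
        !(PySem.Set.contains ['!', '"', '#', '$', '%', '&', '\'', '(', ')', '*', '+', '-', '.', '/',
          ':', ';', '<', '=', '>', '?', '@', '[', '\\', ']', '^', '_', '`', '{', '|', '}', '~'] c)) = true := by
      decide
    have := List.all_eq_true.mp hall c h
    simpa using this
  · have hsubB : (['!', '"', '#', '$', '%', '&', '\'', '(', ')', '*', '+', '-', '.', '/',
        ':', ';', '<', '=', '>', '?', '@', '[', '\\', ']', '^', '_', '`', '{', '|', '}', '~'] : List Char).all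
        (fun x => pyPunctuation.contains x) = true := by rfl
    have hsub : ∀ x ∈ (['!', '"', '#', '$', '%', '&', '\'', '(', ')', '*', '+', '-', '.', '/',
        ':', ';', '<', '=', '>', '?', '@', '[', '\\', ']', '^', '_', '`', '{', '|', '}', '~'] : List Char),
        x ∈ pyPunctuation := fun x hx => List.mem_of_elem_eq_true (List.all_eq_true.mp hsubB x hx)
    have h2 : c ∉ (['!', '"', '#', '$', '%', '&', '\'', '(', ')', '*', '+', '-', '.', '/',
        ':', ';', '<', '=', '>', '?', '@', '[', '\\', ']', '^', '_', '`', '{', '|', '}', '~'] : List Char) :=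
      fun hm => h (hsub c hm)
    simp [pyAAllowed, PySem.Set.contains, h, h2]

-- "no forbidden character in l" (what B's first branch checks, accumulated)
def allOK (l : List Char) : Bool := l.all (fun c => !(PySem.Set.contains pyForbidden c))

def nonspace (c : Char) : Bool := !(PySem.Chars.isspace c)

-- A's checks on the current segment, as a function of B's state and the not-yet-read part s1
def aSegCont (s1 : List Char) (first seen atStart prevSp : Bool) : Bool :=
  (seen || s1.any nonspace) &&
  !(first && atStart && (match s1 with | [] => false | c :: _ => PySem.Chars.isspace c)) &&
  pyASegScan s1 (if prevSp then 1 else 0)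

def aContS (segs : List (List Char)) (first seen atStart prevSp : Bool) : Bool :=
  match segs with
  | [] => true
  | s1 :: rest => aSegCont s1 first seen atStart prevSp && pyAOuter rest false

-- on a fresh segment state, aContS is exactly A's outer loop
theorem aContS_fresh (s1 : List Char) (rest : List (List Char)) (first : Bool) :
    aContS (s1 :: rest) first false true false = pyAOuter (s1 :: rest) first := by
  cases s1 with
  | nil => simp [aContS, aSegCont, pyAOuter]
  | cons c cs =>
    simp only [aContS, aSegCont, pyAOuter, Bool.false_or, Bool.and_true, List.isEmpty_cons,
      PySem.Chars.strIsspace, List.headD_cons, Bool.false_eq_true, Bool.not_false, Bool.true_and]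
    by_cases hsp : PySem.Chars.isspace c <;>
      by_cases hf : first = true <;>
      rcases hany : (c :: cs).any nonspace with _ | _ <;>
      rcases hscan : pyASegScan (c :: cs) 0 with _ | _ <;>
      simp_all [nonspace, List.any_cons] <;> tauto

-- MAIN: B's state machine computes A's split-based checks, for every state
theorem main_inv (l : List Char) (first seen atStart prevSp : Bool) :
    pyBLoop l first seen atStart prevSp =
      (allOK l && aContS (mySplit l) first seen atStart prevSp) := by
  induction l generalizing first seen atStart prevSp with
  | nil =>
    simp [pyBLoop, allOK, mySplit_nil, aContS, aSegCont, pyAOuter, pyASegScan]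
  | cons c rest ih =>
    by_cases hfb : c ∈ pyForbidden
    · simp [pyBLoop, hfb, allOK, PySem.Set.contains]
    · by_cases hc : c = ','
      · subst hc
        rw [mySplit_comma]
        rcases hseen : seen with _ | _
        · simp [pyBLoop, hfb, allOK, aContS, aSegCont, pyASegScan]
        · simp only [pyBLoop, hfb, Bool.false_eq_true, if_false, beq_self_eq_true, if_true,
            Bool.not_true, ih]
          rcases hm : mySplit rest with _ | ⟨s1, ss⟩
          · exact absurd hm (mySplit_ne_nil rest)
          · rw [aContS_fresh]
            simp [allOK, hfb, aContS, aSegCont, pyAOuter, pyASegScan, Bool.and_assoc]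
      · rw [mySplit_cons c rest hc]
        rcases hm : mySplit rest with _ | ⟨s1, ss⟩
        · exact absurd hm (mySplit_ne_nil rest)
        · simp only [prependFirst]
          by_cases hsp : PySem.Chars.isspace c
          · have hcomma : (c == ',') = false := by simp [hc]
            rcases hps : prevSp with _ | _ <;> rcases has : (atStart && first) with _ | _
            · -- no reject: consume the space
              simp only [pyBLoop, hfb, Bool.false_eq_true, if_false, hcomma, hsp, if_true,
                Bool.false_or, ih, hm]
              have has1 : atStart = false ∨ first = false := by
                rcases atStart <;> rcases first <;> simp_all
              simp only [allOK, List.all_cons, hfb, Bool.not_false, Bool.true_and,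
                aContS, aSegCont, List.any_cons]
              have : nonspace c = false := by simp [nonspace, hsp]
              rcases has1 with h1 | h1 <;>
                simp [this, pyASegScan, hsp, h1, Bool.and_assoc]
            · simp only [pyBLoop, hfb, Bool.false_eq_true, if_false, hcomma, hsp, if_true,
                Bool.false_or]
              simp [aContS, aSegCont]
              rcases atStart <;> rcases first <;> simp_all
            · simp only [pyBLoop, hfb, Bool.false_eq_true, if_false, hcomma, hsp, if_true,
                Bool.true_or]
              simp [aContS, aSegCont, pyASegScan, hsp]
            · simp only [pyBLoop, hfb, Bool.false_eq_true, if_false, hcomma, hsp, if_true,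
                Bool.true_or]
              simp [aContS, aSegCont, pyASegScan, hsp]
          · -- ordinary character
            have hcomma : (c == ',') = false := by simp [hc]
            simp only [pyBLoop, hfb, Bool.false_eq_true, if_false, hcomma, hsp, ih, hm]
            simp only [allOK, List.all_cons, hfb, Bool.not_false, Bool.true_and,
              aContS, aSegCont, List.any_cons]
            have hns : nonspace c = true := by simp [nonspace, hsp]
            simp [hns, pyASegScan, hsp, Bool.and_assoc]

-- ===== VERDICT (by name: the statement is the Claim_ definition above) =====
theorem check_if_input_format_is_valid_spec : Claim_equal_check_if_input_format_is_valid := by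
  intro user_input _
  unfold Spec_check_if_input_format_is_valid
  unfold check_if_input_format_is_valid check_if_input_format_is_valid_alt
  by_cases h0 : user_input == ""
  · simp [h0]
  · simp only [h0, Bool.false_eq_true, if_false]
    rw [main_inv, splitOn_eq_mySplit]
    have hall : user_input.toList.all pyAAllowed = allOK user_input.toList := by
      unfold allOK
      induction user_input.toList with
      | nil => rfl
      | cons c cs ihc => simp [List.all_cons, allowed_iff c, ihc]
    rw [hall]
    rcases hok : allOK user_input.toList with _ | _
    · simp
    · simp only [Bool.not_true, Bool.false_eq_true, if_false, Bool.true_and]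
      rcases hm : mySplit user_input.toList with _ | ⟨s1, ss⟩
      · exact absurd hm (mySplit_ne_nil _)
      · rw [aContS_fresh]
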